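-- pv_equiv track=rewrite | github.com/mohamadsolkhannawawi/informatics-practicum-portfolio | Semester-4/Algorithm-Strategy-Analysis/02-Algorithm-Strategy-Analysis/MisteriPalindoria.py | cariKarakterGanjil
-- ===== SOURCE A (Python) =====
-- def ambilKunci(dictionary, kunciList=None, daftarKunci=None, index=0):
--     if kunciList is None:
--         kunciList = []
--     if daftarKunci is None:
--         daftarKunci = [kunci for kunci in dictionary]  # Ambil daftar kunci
--     if index == len(daftarKunci):
--         return kunciList
--     kunciList.append(daftarKunci[index])
--     return ambilKunci(dictionary, kunciList, daftarKunci, index + 1)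
--
-- def cariKarakterGanjil(frekuensi, karakterGanjil=None, kunciList=None, index=0):
--     if karakterGanjil is None:
--         karakterGanjil = []
--     if kunciList is None:
--         kunciList = ambilKunci(frekuensi)
--     if index == len(kunciList):
--         return karakterGanjil
--     kunci = kunciList[index]
--     if frekuensi[kunci] % 2 != 0:
--         karakterGanjil.append(kunci)
--     return cariKarakterGanjil(frekuensi, karakterGanjil, kunciList, index + 1)
-- ===== SOURCE B (Python) =====
-- def cariKarakterGanjil(frekuensi, karakterGanjil=None, kunciList=None, index=0):
--     # Single in-place while loop instead of the two-level accumulator recursion;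
--     # no ambilKunci helper: list(frekuensi) is the key list. Same None-defaulting,
--     # seeded accumulator, start index and append-in-place semantics as A.
--     if karakterGanjil is None:
--         karakterGanjil = []
--     if kunciList is None:
--         kunciList = list(frekuensi)
--     while index != len(kunciList):
--         kunci = kunciList[index]
--         if frekuensi[kunci] % 2 != 0:
--             karakterGanjil.append(kunci)
--         index += 1
--     return karakterGanjil
-- ===== Notes on version B (the rewrite author's own statement) =====
-- stated objective: simpler
-- what changed: Replaces the two-level accumulator recursion (including the recursive ambilKunci key-collector helper) with list(frekuensi) and one direct in-place while loop over the key positions; same None-defaulting, seeded accumulator, start index and append-in-place semantics.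
import Mathlib
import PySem

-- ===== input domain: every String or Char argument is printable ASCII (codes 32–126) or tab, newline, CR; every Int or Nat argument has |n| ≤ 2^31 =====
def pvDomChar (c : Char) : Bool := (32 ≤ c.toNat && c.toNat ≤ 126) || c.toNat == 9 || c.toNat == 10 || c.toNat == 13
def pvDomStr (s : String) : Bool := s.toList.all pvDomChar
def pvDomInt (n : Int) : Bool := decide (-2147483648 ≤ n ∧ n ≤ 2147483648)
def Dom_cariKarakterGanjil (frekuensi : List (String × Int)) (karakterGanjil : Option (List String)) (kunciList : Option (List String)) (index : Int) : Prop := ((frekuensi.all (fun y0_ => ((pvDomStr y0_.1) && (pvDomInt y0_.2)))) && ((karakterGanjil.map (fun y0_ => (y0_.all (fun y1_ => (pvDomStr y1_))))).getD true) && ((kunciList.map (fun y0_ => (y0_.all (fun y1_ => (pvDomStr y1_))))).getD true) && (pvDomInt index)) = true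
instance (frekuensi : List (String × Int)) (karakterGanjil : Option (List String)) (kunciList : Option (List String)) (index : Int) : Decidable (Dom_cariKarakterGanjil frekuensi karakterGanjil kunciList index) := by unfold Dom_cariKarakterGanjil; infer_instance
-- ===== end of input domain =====

-- B replaces A's two-level accumulator recursion (incl. the recursive key-collector helper)
-- with list(frekuensi) and one direct for-loop over range(index, len(kunciList)) (idiomatic).
-- Both A and B append in place to a caller-supplied karakterGanjil list (same side effect);
-- the theorems below are about the return value.

-- ===== PORT A =====
-- fuel counts the remaining recursion steps, (len(daftarKunci) - index).toNat at entry;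
-- fuel = 0 is exactly Python's 'index == len(daftarKunci)' base case on admitted inputs.
-- pyGet? = none is Python's IndexError; a missing dict key (KeyError, read here as getD 0,
-- which never appends) is excluded by Pre_.
def ambilKunciGo (dk : List String) : List String → Int → Nat → List String
  | acc, _, 0 => acc
  | acc, index, fuel+1 =>
    match PySem.List.pyGet? dk index with
    | none => acc
    | some k => ambilKunciGo dk (acc ++ [k]) (index + 1) fuel

def ambilKunci (dictionary : List (String × Int)) (kunciList : Option (List String)) (daftarKunci : Option (List String)) (index : Int) : List String :=
  let kl := kunciList.getD []
  let dk := daftarKunci.getD (PySem.Dict.keys (PySem.Dict.ofList dictionary))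
  ambilKunciGo dk kl index (((dk.length : Int) - index).toNat)

def cariGo (d : PySem.Dict String Int) (kl : List String) : List String → Int → Nat → List String
  | acc, _, 0 => acc
  | acc, index, fuel+1 =>
    match PySem.List.pyGet? kl index with
    | none => acc
    | some kunci =>
      cariGo d kl
        (if PySem.Int.mod ((PySem.Dict.get? d kunci).getD 0) 2 ≠ 0 then acc ++ [kunci] else acc)
        (index + 1) fuel

def cariKarakterGanjil (frekuensi : List (String × Int)) (karakterGanjil : Option (List String)) (kunciList : Option (List String)) (index : Int) : List String :=
  let acc := karakterGanjil.getD []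
  let kl := kunciList.getD (ambilKunci frekuensi none none 0)
  cariGo (PySem.Dict.ofList frekuensi) kl acc index (((kl.length : Int) - index).toNat)

-- ===== PORT B =====
-- Source B: kunciList = list(frekuensi) when None, then one while loop 'while index != len(kunciList)'.
-- oddLoop is that loop; fuel = (len(kunciList) - index).toNat at entry, so fuel = 0 is exactly
-- the loop's exit test on admitted inputs (pyGet? none = IndexError, missing key = KeyError,
-- both excluded by Pre_).
def oddLoop (d : PySem.Dict String Int) (kl : List String) : List String → Int → Nat → List String
  | acc, _, 0 => acc
  | acc, index, fuel+1 =>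
    match PySem.List.pyGet? kl index with
    | none => acc
    | some kunci =>
      oddLoop d kl
        (if PySem.Int.mod ((PySem.Dict.get? d kunci).getD 0) 2 ≠ 0 then acc ++ [kunci] else acc)
        (index + 1) fuel

def cariKarakterGanjil_alt (frekuensi : List (String × Int)) (karakterGanjil : Option (List String)) (kunciList : Option (List String)) (index : Int) : List String :=
  let acc := karakterGanjil.getD []
  let kl := kunciList.getD (PySem.Dict.keys (PySem.Dict.ofList frekuensi))
  oddLoop (PySem.Dict.ofList frekuensi) kl acc index (((kl.length : Int) - index).toNat)

-- ===== PRECONDITION & SPEC =====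
-- Pre_ holds exactly where Python A returns normally: index within [-len, len] of the effective
-- key list (outside, A raises IndexError or recurses past the end), and every key the loop
-- reads present in the dict (otherwise KeyError).
def Pre_cariKarakterGanjil (frekuensi : List (String × Int)) (karakterGanjil : Option (List String)) (kunciList : Option (List String)) (index : Int) : Prop :=
  let kl := kunciList.getD (PySem.Dict.keys (PySem.Dict.ofList frekuensi))
  ((-(kl.length : Int)) ≤ index) ∧ index ≤ (kl.length : Int) ∧
  ∀ k ∈ kl.drop index.toNat, (PySem.Dict.get? (PySem.Dict.ofList frekuensi) k).isSome
instance (frekuensi : List (String × Int)) (karakterGanjil : Option (List String)) (kunciList : Option (List String)) (index : Int) : Decidable (Pre_cariKarakterGanjil frekuensi karakterGanjil kunciList index) := by unfold Pre_cariKarakterGanjil; infer_instance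

def pvWitness_cariKarakterGanjil : (List (String × Int)) × Option (List String) × Option (List String) × Int :=
  ([("a", 1), ("b", 2), ("c", 3)], none, none, 0)

def Spec_cariKarakterGanjil (frekuensi : List (String × Int)) (karakterGanjil : Option (List String)) (kunciList : Option (List String)) (index : Int) (out : List String) : Prop := out = cariKarakterGanjil_alt frekuensi karakterGanjil kunciList index
instance (frekuensi : List (String × Int)) (karakterGanjil : Option (List String)) (kunciList : Option (List String)) (index : Int) (out : List String) : Decidable (Spec_cariKarakterGanjil frekuensi karakterGanjil kunciList index out) := by unfold Spec_cariKarakterGanjil; infer_instance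

-- ===== CLAIM (what is proved, stated in full; the proofs are below) =====
def Claim_equal_cariKarakterGanjil : Prop := ∀ (frekuensi : List (String × Int)) (karakterGanjil : Option (List String)) (kunciList : Option (List String)) (index : Int), Dom_cariKarakterGanjil frekuensi karakterGanjil kunciList index → Pre_cariKarakterGanjil frekuensi karakterGanjil kunciList index → Spec_cariKarakterGanjil frekuensi karakterGanjil kunciList index (cariKarakterGanjil frekuensi karakterGanjil kunciList index)

-- ===== LEMMAS AND PROOFS =====

-- A's ambilKunci, started at a nonnegative index with exact fuel, appends the tail of dk.
theorem ambilKunciGo_eq_drop (dk : List String) :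
    ∀ (fuel : Nat) (index : Int) (acc : List String),
      fuel = ((dk.length : Int) - index).toNat → 0 ≤ index →
      ambilKunciGo dk acc index fuel = acc ++ dk.drop index.toNat := by
  intro fuel
  induction fuel with
  | zero =>
    intro index acc hf hi
    have : (dk.length : Int) ≤ index := by omega
    have hd : dk.drop index.toNat = [] := List.drop_eq_nil_of_le (by omega)
    simp [ambilKunciGo, hd]
  | succ f ih =>
    intro index acc hf hi
    have hlt : index.toNat < dk.length := by omega
    have hget : PySem.List.pyGet? dk index = dk[index.toNat]? :=
      PySem.List.pyGet?_of_nonneg dk hi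
    rw [List.getElem?_eq_getElem hlt] at hget
    have hdrop : dk.drop index.toNat = dk[index.toNat] :: dk.drop (index.toNat + 1) :=
      List.drop_eq_getElem_cons hlt
    have hnat : (index + 1).toNat = index.toNat + 1 := by omega
    rw [ambilKunciGo, hget]
    show ambilKunciGo dk (acc ++ [dk[index.toNat]]) (index + 1) f = acc ++ dk.drop index.toNat
    rw [ih (index + 1) (acc ++ [dk[index.toNat]]) (by omega) (by omega)]
    rw [hnat, hdrop, List.append_assoc, List.singleton_append]

theorem ambilKunci_eq_keys (frekuensi : List (String × Int)) :
    ambilKunci frekuensi none none 0 = PySem.Dict.keys (PySem.Dict.ofList frekuensi) := by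
  show ambilKunciGo (PySem.Dict.keys (PySem.Dict.ofList frekuensi)) [] 0 _ = _
  rw [ambilKunciGo_eq_drop _ _ 0 [] (by simp) le_rfl]
  simp

-- A's body recursion and B's while loop run the identical step state machine.
theorem cariGo_eq_oddLoop (d : PySem.Dict String Int) (kl : List String) :
    ∀ (fuel : Nat) (index : Int) (acc : List String),
      cariGo d kl acc index fuel = oddLoop d kl acc index fuel := by
  intro fuel
  induction fuel with
  | zero => intro index acc; rfl
  | succ f ih =>
    intro index acc
    rw [cariGo, oddLoop]
    rcases h : PySem.List.pyGet? kl index with _ | k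
    · rfl
    · exact ih (index + 1) _

-- ===== VERDICT (by name: the statement is the Claim_ definition above) =====
theorem cariKarakterGanjil_spec : Claim_equal_cariKarakterGanjil := by
  intro frekuensi karakterGanjil kunciList index _hDom hPre
  unfold Spec_cariKarakterGanjil cariKarakterGanjil cariKarakterGanjil_alt
  simp only [ambilKunci_eq_keys]
  exact cariGo_eq_oddLoop _ _ _ index (karakterGanjil.getD [])
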